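-- pv_equiv track=rewrite | github.com/ai-visible/openblog | pipeline/processors/cleanup.py | _remove_duplicate_h1
-- ===== SOURCE A (Python) =====
-- def _remove_duplicate_h1(html: str) -> str:
--     """Remove duplicate h1 tags, keep only first."""
--     h1_count = 0
--     result = []
--
--     for line in html.split("\n"):
--         if "<h1>" in line.lower():
--             h1_count += 1
--             if h1_count > 1:
--                 # Skip duplicate h1s
--                 continue
--         result.append(line)
--
--     return "\n".join(result)
-- ===== SOURCE B (Python) =====
-- def _remove_duplicate_h1(html: str) -> str:
--     """Remove duplicate h1 tags, keep only first."""
--     lines = html.split("\n")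
--     h1_indices = [i for i, line in enumerate(lines) if "<h1>" in line.lower()]
--     drop = set(h1_indices[1:])
--     return "\n".join(line for i, line in enumerate(lines) if i not in drop)
-- ===== Notes on version B (the rewrite author's own statement) =====
-- stated objective: alternative
-- what changed: Replaces the single counter-driven streaming pass with two differently-shaped passes: first collect the indices of all h1 lines, build a drop-set of every h1 index except the first, then rebuild the output keeping lines whose index is not in that set.
import Mathlib
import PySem

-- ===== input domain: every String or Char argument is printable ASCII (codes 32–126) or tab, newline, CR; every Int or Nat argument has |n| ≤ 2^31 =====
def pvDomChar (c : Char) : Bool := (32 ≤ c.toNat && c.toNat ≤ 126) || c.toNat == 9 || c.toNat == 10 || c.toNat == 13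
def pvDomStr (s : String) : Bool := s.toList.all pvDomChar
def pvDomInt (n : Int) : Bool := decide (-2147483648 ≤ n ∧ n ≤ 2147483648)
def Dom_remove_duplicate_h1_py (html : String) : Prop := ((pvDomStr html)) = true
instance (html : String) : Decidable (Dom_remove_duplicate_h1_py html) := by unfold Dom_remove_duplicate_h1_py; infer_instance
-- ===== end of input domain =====

-- B rebuilds the output from a precomputed drop-set of duplicate-h1 line indices instead of A's counter-driven single pass; alternative decomposition, same cost.

-- ===== PORT A =====
-- shared helpers for the expressions both Pythons contain verbatim:
-- '"<h1>" in line.lower()' and 'html.split("\n")' (split? is some for a nonempty separator, so getD is exact)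
def pvH1 (line : String) : Bool := PySem.Str.isIn "<h1>" (PySem.Str.lower line)
def pvSplitNL (html : String) : List String := (PySem.Str.split? html "\n").getD []

-- the body of A's for-loop as a fold step over the state (h1_count, result)
def pvStepA (st : Int × List String) (line : String) : Int × List String :=
  if pvH1 line then
    if st.1 + 1 > 1 then (st.1 + 1, st.2)
    else (st.1 + 1, st.2 ++ [line])
  else (st.1, st.2 ++ [line])

def remove_duplicate_h1_py (html : String) : String :=
  PySem.Str.join "\n" ((pvSplitNL html).foldl pvStepA (0, [])).2

-- ===== PORT B =====
def remove_duplicate_h1_py_alt (html : String) : String :=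
  let lines := pvSplitNL html
  let h1Indices := (PySem.List.enumerate lines).filterMap
    (fun q => if pvH1 q.2 then some q.1 else none)
  let drop := PySem.Set.ofList (h1Indices.drop 1)
  PySem.Str.join "\n" ((PySem.List.enumerate lines).filterMap
    (fun q => if PySem.Set.contains drop q.1 then none else some q.2))

-- ===== PRECONDITION & SPEC =====
def Spec_remove_duplicate_h1_py (html : String) (out : String) : Prop := out = remove_duplicate_h1_py_alt html
instance (html : String) (out : String) : Decidable (Spec_remove_duplicate_h1_py html out) := by unfold Spec_remove_duplicate_h1_py; infer_instance

-- ===== CLAIM (what is proved, stated in full; the proofs are below) =====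
def Claim_equal_remove_duplicate_h1_py : Prop := ∀ (html : String), Dom_remove_duplicate_h1_py html → Spec_remove_duplicate_h1_py html (remove_duplicate_h1_py html)

-- ===== LEMMAS AND PROOFS =====

-- reference: the list of kept lines ('seen' = an h1 line has already been kept)
def pvKeep (seen : Bool) : List String → List String
  | [] => []
  | l :: ls =>
      if pvH1 l then (if seen then pvKeep true ls else l :: pvKeep true ls)
      else l :: pvKeep seen ls

-- B-side views
def pvIdxs (s : Int) (ls : List String) : List Int :=
  (PySem.List.enumerate ls s).filterMap (fun q => if pvH1 q.2 then some q.1 else none)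

def pvEmit (s : Int) (ls : List String) (D : PySem.Set Int) : List String :=
  (PySem.List.enumerate ls s).filterMap (fun q => if PySem.Set.contains D q.1 then none else some q.2)

lemma pvIdxs_nil (s : Int) : pvIdxs s [] = [] := by
  simp [pvIdxs, PySem.List.enumerate_nil]

lemma pvIdxs_cons (s : Int) (l : String) (ls : List String) :
    pvIdxs s (l :: ls) = (if pvH1 l then [s] else []) ++ pvIdxs (s + 1) ls := by
  simp only [pvIdxs, PySem.List.enumerate_cons, List.filterMap_cons]
  cases pvH1 l <;> simp

lemma pvIdxs_lb (ls : List String) : ∀ (s i : Int), i ∈ pvIdxs s ls → s ≤ i := by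
  induction ls with
  | nil => intro s i h; rw [pvIdxs_nil] at h; cases h
  | cons l ls ih =>
      intro s i h
      rw [pvIdxs_cons] at h
      by_cases hp : pvH1 l
      · simp [hp] at h
        rcases h with rfl | h
        · exact le_rfl
        · have := ih (s + 1) i h; omega
      · simp [hp] at h
        have := ih (s + 1) i h; omega

lemma pvEmit_cons (s : Int) (l : String) (ls : List String) (D : PySem.Set Int) :
    pvEmit s (l :: ls) D =
      (if PySem.Set.contains D s then [] else [l]) ++ pvEmit (s + 1) ls D := by
  simp only [pvEmit, PySem.List.enumerate_cons, List.filterMap_cons]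
  cases PySem.Set.contains D s <;> simp

lemma pvB_true (ls : List String) : ∀ (s : Int) (D : PySem.Set Int),
    (∀ i, s ≤ i → (i ∈ D ↔ i ∈ pvIdxs s ls)) → pvEmit s ls D = pvKeep true ls := by
  induction ls with
  | nil => intro s D _; simp [pvEmit, PySem.List.enumerate_nil, pvKeep]
  | cons l ls ih =>
      intro s D H
      rw [pvEmit_cons, pvKeep]
      by_cases hp : pvH1 l
      · have hs : s ∈ D := by
          rw [H s le_rfl, pvIdxs_cons]; simp [hp]
        rw [(PySem.Set.contains_iff D s).2 hs]
        simp only [hp, if_true, List.nil_append]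
        exact ih (s + 1) D (by
          intro i hi
          rw [H i (by omega), pvIdxs_cons]
          simp only [hp, if_true, List.singleton_append, List.mem_cons]
          constructor
          · rintro (rfl | h)
            · omega
            · exact h
          · exact Or.inr)
      · have hs : s ∉ D := by
          intro h
          have hm := (H s le_rfl).1 h
          rw [pvIdxs_cons] at hm
          simp [hp] at hm
          have := pvIdxs_lb ls (s + 1) s hm
          omega
        rw [Bool.eq_false_iff.2 (fun h => hs ((PySem.Set.contains_iff D s).1 h))]
        simp only [hp, if_false, Bool.false_eq_true, List.singleton_append]
        rw [ih (s + 1) D (by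
          intro i hi
          rw [H i (by omega), pvIdxs_cons]
          simp [hp])]

lemma pvB_false (ls : List String) : ∀ (s : Int) (D : PySem.Set Int),
    (∀ i, s ≤ i → (i ∈ D ↔ i ∈ (pvIdxs s ls).drop 1)) → pvEmit s ls D = pvKeep false ls := by
  induction ls with
  | nil => intro s D _; simp [pvEmit, PySem.List.enumerate_nil, pvKeep]
  | cons l ls ih =>
      intro s D H
      rw [pvEmit_cons, pvKeep]
      by_cases hp : pvH1 l
      · have hdrop : (pvIdxs s (l :: ls)).drop 1 = pvIdxs (s + 1) ls := by
          rw [pvIdxs_cons]; simp [hp]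
        have hs : s ∉ D := by
          intro h
          have hm := (H s le_rfl).1 h
          rw [hdrop] at hm
          have := pvIdxs_lb ls (s + 1) s hm
          omega
        rw [Bool.eq_false_iff.2 (fun h => hs ((PySem.Set.contains_iff D s).1 h))]
        simp only [hp, if_true]
        rw [pvB_true ls (s + 1) D (by
          intro i hi
          rw [H i (by omega), hdrop])]
        simp
      · have hdrop : (pvIdxs s (l :: ls)).drop 1 = (pvIdxs (s + 1) ls).drop 1 := by
          rw [pvIdxs_cons]; simp [hp]
        have hs : s ∉ D := by
          intro h
          have hm := (H s le_rfl).1 h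
          rw [hdrop] at hm
          have := pvIdxs_lb ls (s + 1) s (List.mem_of_mem_drop hm)
          omega
        rw [Bool.eq_false_iff.2 (fun h => hs ((PySem.Set.contains_iff D s).1 h))]
        simp only [hp, if_false, Bool.false_eq_true, List.singleton_append]
        rw [ih (s + 1) D (by
          intro i hi
          rw [H i (by omega), hdrop])]

lemma pvA_true (ls : List String) : ∀ (cnt : Int) (res : List String), 1 ≤ cnt →
    (ls.foldl pvStepA (cnt, res)).2 = res ++ pvKeep true ls := by
  induction ls with
  | nil => intro cnt res _; simp [pvKeep]
  | cons l ls ih =>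
      intro cnt res hc
      simp only [List.foldl_cons, pvStepA, pvKeep]
      by_cases hp : pvH1 l
      · simp only [hp, if_true]
        rw [if_pos (by omega)]
        exact ih (cnt + 1) res (by omega)
      · simp only [hp, if_false, Bool.false_eq_true]
        rw [ih cnt (res ++ [l]) hc]
        simp

lemma pvA_false (ls : List String) : ∀ (res : List String),
    (ls.foldl pvStepA (0, res)).2 = res ++ pvKeep false ls := by
  induction ls with
  | nil => intro res; simp [pvKeep]
  | cons l ls ih =>
      intro res
      simp only [List.foldl_cons, pvStepA, pvKeep]
      by_cases hp : pvH1 l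
      · simp only [hp, if_true]
        rw [if_neg (by omega)]
        rw [pvA_true ls (0 + 1) (res ++ [l]) (by norm_num)]
        simp
      · simp only [hp, if_false, Bool.false_eq_true]
        rw [ih (res ++ [l])]
        simp

-- ===== VERDICT (by name: the statement is the Claim_ definition above) =====
theorem remove_duplicate_h1_py_spec : Claim_equal_remove_duplicate_h1_py := by
  intro html _
  show remove_duplicate_h1_py html = remove_duplicate_h1_py_alt html
  show PySem.Str.join "\n" ((pvSplitNL html).foldl pvStepA (0, [])).2
      = PySem.Str.join "\n"
          (pvEmit 0 (pvSplitNL html)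
            (PySem.Set.ofList ((pvIdxs 0 (pvSplitNL html)).drop 1)))
  rw [pvA_false, List.nil_append]
  congr 1
  exact (pvB_false (pvSplitNL html) 0 _ (by
    intro i _
    exact PySem.Set.mem_ofList _ i)).symm
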